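-- pv_equiv track=rewrite | github.com/dessie1212/personal_projects | PycharmProjects/pythonProject1/exam2.py | getMaxUnits
-- ===== SOURCE A (Python) =====
-- def getMaxUnits(boxes, unitsPerBox, truckSize):
--     # Check if truck size is positive
--     if truckSize < 1:
--         raise ValueError("Truck size must be a positive number.")
--
--     if len(boxes) < 1:
--         raise ValueError("The number of boxes must be greater than or equal to 1.")
--
--     # Check if boxes and unitsPerBox arrays have the same length
--     if len(boxes) != len(unitsPerBox):
--         raise ValueError("The length of boxes and unitsPerBox must be the same.")
--
--
--     # Check if any entry in boxes or unitsPerBox is negative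
--     if any(box < 1 for box in boxes) or any(unit < 1 for unit in unitsPerBox):
--         raise ValueError("Boxes and unitsPerBox must not contain negative values.")
--
--     # Pair each product's box count and units per box
--     box_unit_pairs = [(boxes[i], unitsPerBox[i]) for i in range(len(boxes))]
--
--     # Sort pairs in descending order of units per box
--     box_unit_pairs.sort(key=lambda x: x[1], reverse=True)
--
--     total_units = 0
--     # Load boxes into the truck from highest to lowest units per box
--     for box_count, unit_per_box in box_unit_pairs:
--         # Take as many boxes as possible, limited by the truck's capacity
--         boxes_to_take = min(truckSize, box_count)
--
--         # Add the units from the boxes taken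
--         total_units += boxes_to_take * unit_per_box
--
--         # Decrease truck size by the number of boxes taken
--         truckSize -= boxes_to_take
--
--         # Stop if the truck is full
--         if truckSize == 0:
--             break
--
--     return total_units
-- ===== SOURCE B (Python) =====
-- def getMaxUnits(boxes, unitsPerBox, truckSize):
--     if truckSize < 1:
--         raise ValueError("Truck size must be a positive number.")
--     if len(boxes) < 1:
--         raise ValueError("The number of boxes must be greater than or equal to 1.")
--     if len(boxes) != len(unitsPerBox):
--         raise ValueError("The length of boxes and unitsPerBox must be the same.")
--     if any(box < 1 for box in boxes) or any(unit < 1 for unit in unitsPerBox):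
--         raise ValueError("Boxes and unitsPerBox must not contain negative values.")
--
--     # No sorting and no capacity-consuming loop: either the truck fits everything,
--     # or we binary-search the cutoff unit value u* (the unit value of the last box
--     # loaded) and compute the answer by two counting sums.
--     total_boxes = sum(boxes)
--     if total_boxes <= truckSize:
--         return sum(b * u for b, u in zip(boxes, unitsPerBox))
--
--     def cnt_ge(u):
--         # number of boxes whose unit value is at least u
--         return sum(b for b, v in zip(boxes, unitsPerBox) if v >= u)
--
--     lo, hi = 1, max(unitsPerBox)
--     # invariant: cnt_ge(lo) >= truckSize; find the largest such value
--     while lo < hi: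
--         mid = (lo + hi + 1) // 2
--         if cnt_ge(mid) >= truckSize:
--             lo = mid
--         else:
--             hi = mid - 1
--     u_star = lo
--     above_boxes = cnt_ge(u_star + 1)
--     above_units = sum(b * v for b, v in zip(boxes, unitsPerBox) if v > u_star)
--     return above_units + (truckSize - above_boxes) * u_star
-- ===== Notes on version B (the rewrite author's own statement) =====
-- stated objective: alternative
-- what changed: A sorts all (count, unit) pairs and runs a capacity-decrementing greedy loop with a break; B never sorts and has no such loop: it binary-searches on the unit-value axis for the cutoff value u* of the last box loaded and computes the answer with two counting sums (units of all boxes above u*, plus the remaining capacity times u*).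
import Mathlib
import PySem

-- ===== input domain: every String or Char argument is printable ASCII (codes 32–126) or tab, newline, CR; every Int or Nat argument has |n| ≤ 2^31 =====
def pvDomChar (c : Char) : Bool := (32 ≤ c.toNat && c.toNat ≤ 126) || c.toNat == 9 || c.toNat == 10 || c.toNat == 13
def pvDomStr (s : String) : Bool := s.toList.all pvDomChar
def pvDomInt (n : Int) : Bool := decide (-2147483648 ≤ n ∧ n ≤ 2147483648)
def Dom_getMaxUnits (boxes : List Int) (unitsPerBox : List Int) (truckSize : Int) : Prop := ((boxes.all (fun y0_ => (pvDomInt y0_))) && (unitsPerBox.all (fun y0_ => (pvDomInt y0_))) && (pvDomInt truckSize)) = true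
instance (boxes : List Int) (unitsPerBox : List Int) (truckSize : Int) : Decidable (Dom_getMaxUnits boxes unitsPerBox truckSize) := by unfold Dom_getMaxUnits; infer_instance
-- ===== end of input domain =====

-- B replaces A's sort-then-greedy-loop by a binary search on the unit-value axis for the
-- cutoff unit value of the last box loaded, plus two counting sums (alternative algorithm).

-- ===== PORT A =====
-- the for-loop with its early `break`: state is (truckSize, running total)
def pvLoopA : Int → List (Int × Int) → Int
  | _, [] => 0
  | t, (c, u) :: rest =>
      let take := min t c
      take * u + (if t - take = 0 then 0 else pvLoopA (t - take) rest)

def getMaxUnits (boxes : List Int) (unitsPerBox : List Int) (truckSize : Int) : Int :=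
  if truckSize < 1 then 0                                    -- raise ValueError (excluded by Pre_)
  else if boxes.length < 1 then 0                            -- raise ValueError (excluded by Pre_)
  else if boxes.length ≠ unitsPerBox.length then 0           -- raise ValueError (excluded by Pre_)
  else if (boxes.any (fun b => b < 1)) || (unitsPerBox.any (fun u => u < 1)) then 0  -- raise (excluded by Pre_)
  else
    -- box_unit_pairs = [(boxes[i], unitsPerBox[i]) for i in range(len(boxes))]  (indices in range)
    let pairs := (PySem.List.pyRange 0 (PySem.List.len boxes)).map
        (fun i => (PySem.List.pyGetD boxes i 0, PySem.List.pyGetD unitsPerBox i 0))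
    -- box_unit_pairs.sort(key=lambda x: x[1], reverse=True)
    let sortedPairs := PySem.List.sorted pairs (fun x => x.2) true
    pvLoopA truckSize sortedPairs

-- ===== PORT B =====
-- cnt_ge(u) = sum(b for b, v in zip(boxes, unitsPerBox) if v >= u)
def pvGE (l : List (Int × Int)) (u : Int) : Int :=
  ((l.filter (fun p => u ≤ p.2)).map (fun p => p.1)).sum

-- above_units = sum(b * v for b, v in zip(boxes, unitsPerBox) if v > u_star)
def pvAbove (l : List (Int × Int)) (u : Int) : Int :=
  ((l.filter (fun p => u < p.2)).map (fun p => p.1 * p.2)).sum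

-- the while-loop: invariant t ≤ pvGE l lo; finds the largest u with t ≤ pvGE l u.
-- The fuel argument only makes the recursion structural; (hi - lo).toNat steps always suffice
-- (each iteration shrinks the bracket), and the caller passes exactly that.
def pvBS (l : List (Int × Int)) (t : Int) : Nat → Int → Int → Int
  | 0, lo, _ => lo
  | Nat.succ n, lo, hi =>
      if lo < hi then
        let mid := PySem.Int.floordiv (lo + hi + 1) 2   -- mid = (lo + hi + 1) // 2
        if t ≤ pvGE l mid then pvBS l t n mid hi else pvBS l t n lo (mid - 1)
      else lo

def getMaxUnits_alt (boxes : List Int) (unitsPerBox : List Int) (truckSize : Int) : Int :=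
  if truckSize < 1 then 0                                    -- raise ValueError (excluded by Pre_)
  else if boxes.length < 1 then 0                            -- raise ValueError (excluded by Pre_)
  else if boxes.length ≠ unitsPerBox.length then 0           -- raise ValueError (excluded by Pre_)
  else if (boxes.any (fun b => b < 1)) || (unitsPerBox.any (fun u => u < 1)) then 0  -- raise (excluded by Pre_)
  else
    let totalBoxes := boxes.sum
    if totalBoxes ≤ truckSize then
      -- sum(b * u for b, u in zip(boxes, unitsPerBox))
      ((boxes.zip unitsPerBox).map (fun p => p.1 * p.2)).sum
    else
      -- lo, hi = 1, max(unitsPerBox);  binary search for u_star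
      let hi := (PySem.List.max? unitsPerBox (fun x => x)).getD 0   -- list nonempty here, so never the default
      let uStar := pvBS (boxes.zip unitsPerBox) truckSize (hi - 1).toNat 1 hi
      let aboveBoxes := pvGE (boxes.zip unitsPerBox) (uStar + 1)    -- cnt_ge(u_star + 1)
      let aboveUnits := pvAbove (boxes.zip unitsPerBox) uStar
      aboveUnits + (truckSize - aboveBoxes) * uStar

-- ===== PRECONDITION & SPEC =====
-- Pre_ excludes exactly the inputs on which A raises ValueError (its four validation guards).
def Pre_getMaxUnits (boxes : List Int) (unitsPerBox : List Int) (truckSize : Int) : Prop :=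
  1 ≤ truckSize ∧ boxes ≠ [] ∧ boxes.length = unitsPerBox.length ∧
    (∀ b ∈ boxes, 1 ≤ b) ∧ (∀ u ∈ unitsPerBox, 1 ≤ u)
instance (boxes : List Int) (unitsPerBox : List Int) (truckSize : Int) : Decidable (Pre_getMaxUnits boxes unitsPerBox truckSize) := by unfold Pre_getMaxUnits; infer_instance

def pvWitness_getMaxUnits : List Int × List Int × Int := ([2, 1], [3, 5], 2)

def Spec_getMaxUnits (boxes : List Int) (unitsPerBox : List Int) (truckSize : Int) (out : Int) : Prop := out = getMaxUnits_alt boxes unitsPerBox truckSize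
instance (boxes : List Int) (unitsPerBox : List Int) (truckSize : Int) (out : Int) : Decidable (Spec_getMaxUnits boxes unitsPerBox truckSize out) := by unfold Spec_getMaxUnits; infer_instance

-- ===== CLAIM (what is proved, stated in full; the proofs are below) =====
def Claim_equal_getMaxUnits : Prop := ∀ (boxes : List Int) (unitsPerBox : List Int) (truckSize : Int), Dom_getMaxUnits boxes unitsPerBox truckSize → Pre_getMaxUnits boxes unitsPerBox truckSize → Spec_getMaxUnits boxes unitsPerBox truckSize (getMaxUnits boxes unitsPerBox truckSize)

-- ===== LEMMAS AND PROOFS =====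

-- the greedy loop with the `break` removed (proof device)
def pvGoNB : Int → List (Int × Int) → Int
  | _, [] => 0
  | t, (c, u) :: rest => min t c * u + pvGoNB (t - min t c) rest

lemma pvGoNB_zero : ∀ (l : List (Int × Int)), (∀ p ∈ l, 0 ≤ p.1) → pvGoNB 0 l = 0 := by
  intro l h
  induction l with
  | nil => rfl
  | cons p r ih =>
      obtain ⟨c, u⟩ := p
      have hc : (0 : Int) ≤ c := h (c, u) (by simp)
      have hmin : min (0 : Int) c = 0 := by omega
      simp [pvGoNB, hmin, ih (fun q hq => h q (List.mem_cons_of_mem _ hq))]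

lemma pvLoopA_eq_goNB : ∀ (l : List (Int × Int)) (t : Int), 0 ≤ t → (∀ p ∈ l, 0 ≤ p.1) →
    pvLoopA t l = pvGoNB t l := by
  intro l
  induction l with
  | nil => intro t _ _; rfl
  | cons p r ih =>
      intro t ht h
      obtain ⟨c, u⟩ := p
      have hc : (0 : Int) ≤ c := h (c, u) (by simp)
      have hr : ∀ q ∈ r, (0 : Int) ≤ q.1 := fun q hq => h q (List.mem_cons_of_mem _ hq)
      by_cases hz : t - min t c = 0
      · simp [pvLoopA, pvGoNB, hz, pvGoNB_zero r hr]
      · simp [pvLoopA, pvGoNB, hz, ih (t - min t c) (by omega) hr]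

lemma pvGE_cons (c u0 : Int) (rest : List (Int × Int)) (u : Int) :
    pvGE ((c, u0) :: rest) u = (if u ≤ u0 then c else 0) + pvGE rest u := by
  by_cases h : u ≤ u0 <;> simp [pvGE, h]

lemma pvAbove_cons (c u0 : Int) (rest : List (Int × Int)) (u : Int) :
    pvAbove ((c, u0) :: rest) u = (if u < u0 then c * u0 else 0) + pvAbove rest u := by
  by_cases h : u < u0 <;> simp [pvAbove, h]

lemma pvGE_nonneg (l : List (Int × Int)) (u : Int) (h : ∀ p ∈ l, 0 ≤ p.1) :
    0 ≤ pvGE l u := by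
  apply List.sum_nonneg; intro x hx
  obtain ⟨q, hq, rfl⟩ := List.mem_map.mp hx
  exact h q (List.mem_filter.mp hq).1

lemma pvGE_eq_zero (l : List (Int × Int)) (u : Int) (h : ∀ p ∈ l, p.2 < u) :
    pvGE l u = 0 := by
  have : l.filter (fun p => decide (u ≤ p.2)) = [] :=
    List.filter_eq_nil_iff.mpr (fun p hp => by have := h p hp; simp; omega)
  simp [pvGE, this]

lemma pvAbove_eq_zero (l : List (Int × Int)) (u : Int) (h : ∀ p ∈ l, p.2 ≤ u) :
    pvAbove l u = 0 := by
  have : l.filter (fun p => decide (u < p.2)) = [] :=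
    List.filter_eq_nil_iff.mpr (fun p hp => by have := h p hp; simp; omega)
  simp [pvAbove, this]

lemma pvGE_perm {s s' : List (Int × Int)} (h : s.Perm s') (u : Int) :
    pvGE s u = pvGE s' u :=
  List.Perm.sum_eq ((h.filter _).map _)

lemma pvAbove_perm {s s' : List (Int × Int)} (h : s.Perm s') (u : Int) :
    pvAbove s u = pvAbove s' u :=
  List.Perm.sum_eq ((h.filter _).map _)

-- midpoint bounds of the binary-search step
lemma pvMid_bounds (lo hi : Int) (h : lo < hi) :
    lo + 1 ≤ PySem.Int.floordiv (lo + hi + 1) 2 ∧ PySem.Int.floordiv (lo + hi + 1) 2 ≤ hi := by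
  have h1 := PySem.Int.floordiv_mul_add_mod (lo + hi + 1) 2
  have h2 := PySem.Int.mod_nonneg (lo + hi + 1) (b := 2) (by omega)
  have h3 := PySem.Int.mod_lt (lo + hi + 1) (b := 2) (by omega)
  omega

-- with enough fuel, the binary search returns the largest u in [lo, hi] with t ≤ pvGE l u
lemma pvBS_spec (l : List (Int × Int)) (t : Int) :
    ∀ (n : Nat) (lo hi : Int), (hi - lo).toNat ≤ n → lo ≤ hi → t ≤ pvGE l lo →
      lo ≤ pvBS l t n lo hi ∧ pvBS l t n lo hi ≤ hi ∧ t ≤ pvGE l (pvBS l t n lo hi) ∧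
        (pvBS l t n lo hi = hi ∨ pvGE l (pvBS l t n lo hi + 1) < t) := by
  intro n
  induction n with
  | zero =>
      intro lo hi hn hle hlo
      have heq : lo = hi := by omega
      exact ⟨le_refl _, hle, hlo, Or.inl heq⟩
  | succ n ih =>
      intro lo hi hn hle hlo
      simp only [pvBS]
      by_cases h : lo < hi
      · rw [if_pos h]
        have hmid := pvMid_bounds lo hi h
        set mid := PySem.Int.floordiv (lo + hi + 1) 2 with hmdef
        by_cases ht : t ≤ pvGE l mid
        · rw [if_pos ht]
          have := ih mid hi (by omega) (by omega) ht
          exact ⟨by omega, this.2.1, this.2.2.1, this.2.2.2⟩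
        · rw [if_neg ht]
          obtain ⟨h1, h2, h3, h4⟩ := ih lo (mid - 1) (by omega) (by omega) hlo
          refine ⟨h1, by omega, h3, Or.inr ?_⟩
          rcases h4 with h4 | h4
          · rw [h4]
            have hm1 : mid - 1 + 1 = mid := by omega
            rw [hm1]; omega
          · exact h4
      · rw [if_neg h]
        exact ⟨le_refl _, hle, hlo, Or.inl (by omega)⟩

-- filling the whole truck: capacity at least the total box count
lemma pvGoNB_full : ∀ (l : List (Int × Int)) (t : Int), (∀ p ∈ l, 0 ≤ p.1) →
    (l.map (fun p => p.1)).sum ≤ t →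
    pvGoNB t l = (l.map (fun p => p.1 * p.2)).sum := by
  intro l
  induction l with
  | nil => intro t _ _; rfl
  | cons p rest ih =>
      intro t hpos hsum
      obtain ⟨c, u⟩ := p
      have hc : (0 : Int) ≤ c := hpos (c, u) (by simp)
      have hr : ∀ q ∈ rest, (0 : Int) ≤ q.1 := fun q hq => hpos q (List.mem_cons_of_mem _ hq)
      have hrs : (0 : Int) ≤ (rest.map (fun p => p.1)).sum := by
        apply List.sum_nonneg; intro x hx
        obtain ⟨q, hq, rfl⟩ := List.mem_map.mp hx
        exact hr q hq
      simp only [List.map_cons, List.sum_cons] at hsum ⊢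
      have hmin : min t c = c := by omega
      rw [pvGoNB, hmin, ih (t - c) hr (by omega)]

-- the greedy on a units-descending list equals the threshold formula at any cutoff u
-- with pvGE l (u+1) < t ≤ pvGE l u
lemma pvMainThresh : ∀ (l : List (Int × Int)) (t u : Int),
    l.Pairwise (fun a b => b.2 ≤ a.2) → (∀ p ∈ l, 1 ≤ p.1) → 1 ≤ t →
    pvGE l (u + 1) < t → t ≤ pvGE l u →
    pvGoNB t l = pvAbove l u + (t - pvGE l (u + 1)) * u := by
  intro l
  induction l with
  | nil =>
      intro t u _ _ ht h1 h2
      simp [pvGE] at h2; omega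
  | cons p rest ih =>
      intro t u hsort hpos ht hCab hGE
      obtain ⟨c, u0⟩ := p
      have hc : (1 : Int) ≤ c := hpos (c, u0) (by simp)
      have hrle : ∀ q ∈ rest, q.2 ≤ u0 := by
        intro q hq; exact (List.pairwise_cons.mp hsort).1 q hq
      have hposr : ∀ q ∈ rest, (1 : Int) ≤ q.1 := fun q hq => hpos q (List.mem_cons_of_mem _ hq)
      have hposr0 : ∀ q ∈ rest, (0 : Int) ≤ q.1 := fun q hq => by have := hposr q hq; omega
      have hsortr : rest.Pairwise (fun a b => b.2 ≤ a.2) := (List.pairwise_cons.mp hsort).2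
      have hu_le : u ≤ u0 := by
        by_contra hgt
        push_neg at hgt
        have hz : pvGE ((c, u0) :: rest) u = 0 := by
          apply pvGE_eq_zero
          intro q hq
          rcases List.mem_cons.mp hq with rfl | hq'
          · simpa using hgt
          · have := hrle q hq'; omega
        omega
      rw [pvGE_cons] at hGE hCab
      rw [pvGE_cons, pvAbove_cons]
      by_cases hct : t ≤ c
      · -- the head alone fills the truck; the cutoff must be the head's unit value
        have huu : u = u0 := by
          by_contra hne
          have hlt : u < u0 := lt_of_le_of_ne hu_le hne
          have h1 : (if u + 1 ≤ u0 then c else 0) = c := if_pos (by omega)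
          have h2 : 0 ≤ pvGE rest (u + 1) := pvGE_nonneg rest (u + 1) hposr0
          rw [h1] at hCab; omega
        subst huu
        have hz1 : pvGE rest (u + 1) = 0 :=
          pvGE_eq_zero rest (u + 1) (fun q hq => by have := hrle q hq; omega)
        have hz2 : pvAbove rest u = 0 :=
          pvAbove_eq_zero rest u (fun q hq => hrle q hq)
        have hmin : min t c = t := by omega
        rw [pvGoNB, hmin]
        have htt : t - t = 0 := by omega
        rw [htt, pvGoNB_zero rest hposr0, hz1, hz2]
        simp
      · push_neg at hct
        have hmin : min t c = c := by omega
        rw [pvGoNB, hmin]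
        by_cases huu : u = u0
        · subst huu
          have hz1 : pvGE rest (u + 1) = 0 :=
            pvGE_eq_zero rest (u + 1) (fun q hq => by have := hrle q hq; omega)
          have hz2 : pvAbove rest u = 0 :=
            pvAbove_eq_zero rest u (fun q hq => hrle q hq)
          have hGE' : t - c ≤ pvGE rest u := by
            rw [if_pos (le_refl u)] at hGE; omega
          have ih' := ih (t - c) u hsortr hposr (by omega) (by rw [hz1]; omega) hGE'
          rw [ih', hz1, hz2]
          simp
          ring
        · have hlt : u < u0 := lt_of_le_of_ne hu_le huu
          rw [if_pos (by omega : u + 1 ≤ u0)] at hCab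
          rw [if_pos hu_le] at hGE
          have ih' := ih (t - c) u hsortr hposr (by omega) (by omega) (by omega)
          rw [ih', if_pos (by omega : u + 1 ≤ u0), if_pos hlt]
          ring

-- ===== VERDICT (by name: the statement is the Claim_ definition above) =====
theorem getMaxUnits_spec : Claim_equal_getMaxUnits := by
  intro boxes unitsPerBox truckSize _ hpre
  obtain ⟨ht, hne, hlen, hbox, hunit⟩ := hpre
  unfold Spec_getMaxUnits getMaxUnits getMaxUnits_alt
  have hg1 : ¬ (truckSize < 1) := by omega
  have hg2 : ¬ (boxes.length < 1) := by
    have := List.length_pos_of_ne_nil hne; omega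
  have hg3 : ¬ (boxes.length ≠ unitsPerBox.length) := by simpa using hlen
  have hg4a : boxes.any (fun b => b < 1) = false := by
    simp only [List.any_eq_false, decide_eq_true_eq]
    intro b hb; have := hbox b hb; omega
  have hg4b : unitsPerBox.any (fun u => u < 1) = false := by
    simp only [List.any_eq_false, decide_eq_true_eq]
    intro u hu; have := hunit u hu; omega
  simp only [if_neg hg1, if_neg hg2, if_neg hg3, hg4a, hg4b, Bool.or_self,
    Bool.false_eq_true, if_false]
  -- name the pieces
  set Z := boxes.zip unitsPerBox with hZ
  have hpairs : (PySem.List.pyRange 0 (PySem.List.len boxes)).map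
      (fun i => (PySem.List.pyGetD boxes i 0, PySem.List.pyGetD unitsPerBox i 0)) = Z := by
    rw [← List.zip_map']
    rw [PySem.List.map_pyGetD_pyRange_zero boxes 0]
    have hlen' : PySem.List.len boxes = PySem.List.len unitsPerBox := by
      simp [PySem.List.len_eq, hlen]
    rw [hlen', PySem.List.map_pyGetD_pyRange_zero unitsPerBox 0]
  rw [hpairs]
  set S := PySem.List.sorted Z (fun x => x.2) true with hS
  -- facts about Z and S
  have hfst : Z.map (fun p => p.1) = boxes := by
    rw [hZ]
    exact List.map_fst_zip (by omega)
  have hpos1Z : ∀ p ∈ Z, (1 : Int) ≤ p.1 := by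
    intro p hp
    exact hbox p.1 (List.of_mem_zip hp).1
  have hposZ : ∀ p ∈ Z, (0 : Int) ≤ p.1 := fun p hp => by have := hpos1Z p hp; omega
  have hsndZ : ∀ p ∈ Z, p.2 ∈ unitsPerBox := fun p hp => (List.of_mem_zip hp).2
  have hSperm : S.Perm Z := PySem.List.sorted_perm Z (fun x => x.2) true
  have hpos1S : ∀ p ∈ S, (1 : Int) ≤ p.1 := fun p hp => hpos1Z p (hSperm.mem_iff.mp hp)
  have hposS : ∀ p ∈ S, (0 : Int) ≤ p.1 := fun p hp => hposZ p (hSperm.mem_iff.mp hp)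
  have hSpair : S.Pairwise (fun a b => b.2 ≤ a.2) := PySem.List.sorted_pairwise_rev Z (fun x => x.2)
  have hT0 : (0 : Int) ≤ truckSize := by omega
  rw [pvLoopA_eq_goNB S truckSize hT0 hposS]
  by_cases hfull : boxes.sum ≤ truckSize
  · -- everything fits
    rw [if_pos hfull]
    have hsumS : (S.map (fun p => p.1)).sum ≤ truckSize := by
      rw [List.Perm.sum_eq (hSperm.map (fun p => p.1)), hfst]; exact hfull
    rw [pvGoNB_full S truckSize hposS hsumS]
    exact List.Perm.sum_eq (hSperm.map (fun p => p.1 * p.2))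
  · rw [if_neg hfull]
    push_neg at hfull    -- truckSize < boxes.sum
    -- the maximum unit value
    cases hmax : PySem.List.max? unitsPerBox (fun x => x) with
    | none =>
        exfalso
        have : unitsPerBox = [] := (PySem.List.max?_eq_none_iff _ _).mp hmax
        rw [this] at hlen
        simp at hlen
        exact hne hlen
    | some m =>
        have hmmem : m ∈ unitsPerBox := PySem.List.max?_mem hmax
        have hm1 : (1 : Int) ≤ m := hunit m hmmem
        have hmub : ∀ y ∈ unitsPerBox, y ≤ m := by
          intro y hy
          simpa using PySem.List.max?_isMax hmax y hy
        simp only [Option.getD_some]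
        have hGE1 : truckSize ≤ pvGE Z 1 := by
          have hfe : Z.filter (fun p => decide ((1 : Int) ≤ p.2)) = Z := by
            apply List.filter_eq_self.mpr
            intro p hp
            have := hunit p.2 (hsndZ p hp)
            simpa using this
          unfold pvGE
          rw [hfe, hfst]
          omega
        obtain ⟨h1u, hum, htGE, hdisj⟩ :=
          pvBS_spec Z truckSize (m - 1).toNat 1 m (le_refl _) hm1 hGE1
        set uStar := pvBS Z truckSize (m - 1).toNat 1 m with hust
        have hCabZ : pvGE Z (uStar + 1) < truckSize := by
          rcases hdisj with heq | hlt
          · rw [heq]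
            have : pvGE Z (m + 1) = 0 :=
              pvGE_eq_zero Z (m + 1) (fun p hp => by have := hmub p.2 (hsndZ p hp); omega)
            rw [this]; omega
          · exact hlt
        have hGES : truckSize ≤ pvGE S uStar := by rw [pvGE_perm hSperm]; exact htGE
        have hCabS : pvGE S (uStar + 1) < truckSize := by
          rw [pvGE_perm hSperm]; exact hCabZ
        rw [pvMainThresh S truckSize uStar hSpair hpos1S (by omega) hCabS hGES]
        rw [pvAbove_perm hSperm, pvGE_perm hSperm]
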